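-- pv_equiv track=rewrite | github.com/dr-jeehoonju/tune-clinic-landing | scripts/build-photo-shotlist-simple.py | sort_by_priority
-- ===== SOURCE A (Python) =====
-- from collections import defaultdict
--
-- def sort_by_priority(rows: list[dict]) -> list[dict]:
--     order = ["P0", "P1", "P2"]
--     counters: dict[str, int] = defaultdict(int)
--     out: list[dict] = []
--     for pr in order:
--         for r in rows:
--             if r.get("priority") == pr:
--                 counters[pr] += 1
--                 out.append(dict(r))
--     return out
-- ===== SOURCE B (Python) =====
-- def sort_by_priority(rows: list[dict]) -> list[dict]:
--     p0, p1, p2 = [], [], []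
--     for r in rows:
--         p = r.get("priority")
--         if p == "P0":
--             p0.append(dict(r))
--         elif p == "P1":
--             p1.append(dict(r))
--         elif p == "P2":
--             p2.append(dict(r))
--     return p0 + p1 + p2
-- ===== Notes on version B (the rewrite author's own statement) =====
-- stated objective: simpler
-- what changed: One bucketing pass over rows into three lists (one per priority) followed by a concatenation, instead of three full filtered scans of rows; the unused counters dict is dropped.
import Mathlib
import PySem

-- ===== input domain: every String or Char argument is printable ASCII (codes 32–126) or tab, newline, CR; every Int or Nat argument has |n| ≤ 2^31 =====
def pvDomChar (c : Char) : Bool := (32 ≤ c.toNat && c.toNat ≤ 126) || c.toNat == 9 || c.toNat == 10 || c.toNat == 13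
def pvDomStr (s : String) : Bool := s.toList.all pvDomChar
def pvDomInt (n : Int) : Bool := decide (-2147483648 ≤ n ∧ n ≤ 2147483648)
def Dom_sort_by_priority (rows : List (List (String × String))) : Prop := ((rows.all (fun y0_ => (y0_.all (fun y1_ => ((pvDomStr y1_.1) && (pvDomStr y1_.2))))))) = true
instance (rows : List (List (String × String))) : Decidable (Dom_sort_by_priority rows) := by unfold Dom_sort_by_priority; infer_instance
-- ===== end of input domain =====

-- B replaces A's three filtered scans of rows by a single bucketing pass plus a concatenation (objective: simpler).

-- ===== PORT A =====
def sort_by_priority (rows : List (List (String × String))) : List (List (String × String)) :=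
  let order : List String := ["P0", "P1", "P2"]
  -- counters: defaultdict(int); kept for faithfulness though it does not affect the result
  let st := order.foldl (fun st pr =>
    rows.foldl (fun (st : PySem.Dict String Int × List (List (String × String))) r =>
      if (PySem.Dict.mk r).get? "priority" == some pr then
        (st.1.modify pr 0 (· + 1), st.2 ++ [r])
      else st) st) (PySem.Dict.empty, [])
  st.2

-- ===== PORT B =====
def sort_by_priority_alt (rows : List (List (String × String))) : List (List (String × String)) :=
  let b := rows.foldl (fun (b : List (List (String × String)) × List (List (String × String)) × List (List (String × String))) r =>
    let p := (PySem.Dict.mk r).get? "priority"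
    if p == some "P0" then (b.1 ++ [r], b.2.1, b.2.2)
    else if p == some "P1" then (b.1, b.2.1 ++ [r], b.2.2)
    else if p == some "P2" then (b.1, b.2.1, b.2.2 ++ [r])
    else b) ([], [], [])
  b.1 ++ b.2.1 ++ b.2.2

-- ===== PRECONDITION & SPEC =====
def Spec_sort_by_priority (rows : List (List (String × String))) (out : List (List (String × String))) : Prop := out = sort_by_priority_alt rows
instance (rows : List (List (String × String))) (out : List (List (String × String))) : Decidable (Spec_sort_by_priority rows out) := by unfold Spec_sort_by_priority; infer_instance

-- ===== CLAIM (what is proved, stated in full; the proofs are below) =====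
def Claim_equal_sort_by_priority : Prop := ∀ (rows : List (List (String × String))), Dom_sort_by_priority rows → Spec_sort_by_priority rows (sort_by_priority rows)

-- ===== LEMMAS AND PROOFS =====

def pvPrio (r : List (String × String)) : Option String := (PySem.Dict.mk r).get? "priority"

-- A's inner loop over rows, for one priority pr, appends exactly the rows whose priority is pr.
theorem pvA_inner (rows : List (List (String × String))) (pr : String)
    (st : PySem.Dict String Int × List (List (String × String))) :
    (rows.foldl (fun (st : PySem.Dict String Int × List (List (String × String))) r =>
      if (PySem.Dict.mk r).get? "priority" == some pr then
        (st.1.modify pr 0 (· + 1), st.2 ++ [r])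
      else st) st).2 = st.2 ++ rows.filter (fun r => pvPrio r == some pr) := by
  induction rows generalizing st with
  | nil => simp
  | cons r rs ih =>
    simp only [List.foldl_cons, List.filter_cons]
    by_cases h : ((PySem.Dict.mk r).get? "priority" == some pr) = true
    · rw [if_pos h, ih]; simp [pvPrio, h]
    · rw [if_neg h, ih]; simp [pvPrio, h]

-- B's single pass fills the three buckets with the three filters.
theorem pvB_fold (rows : List (List (String × String)))
    (b : List (List (String × String)) × List (List (String × String)) × List (List (String × String))) :
    rows.foldl (fun b r =>
      let p := (PySem.Dict.mk r).get? "priority"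
      if p == some "P0" then (b.1 ++ [r], b.2.1, b.2.2)
      else if p == some "P1" then (b.1, b.2.1 ++ [r], b.2.2)
      else if p == some "P2" then (b.1, b.2.1, b.2.2 ++ [r])
      else b) b
    = (b.1 ++ rows.filter (fun r => pvPrio r == some "P0"),
       b.2.1 ++ rows.filter (fun r => pvPrio r == some "P1"),
       b.2.2 ++ rows.filter (fun r => pvPrio r == some "P2")) := by
  induction rows generalizing b with
  | nil => simp
  | cons r rs ih =>
    simp only [List.foldl_cons, List.filter_cons, pvPrio]
    split_ifs with h0 h1 h2 <;> simp_all [pvPrio]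

-- ===== VERDICT (by name: the statement is the Claim_ definition above) =====
theorem sort_by_priority_spec : Claim_equal_sort_by_priority := by
  intro rows _
  unfold Spec_sort_by_priority sort_by_priority sort_by_priority_alt
  simp only [List.foldl_cons, List.foldl_nil, pvA_inner, pvB_fold]
  simp [pvPrio]
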